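-- pv_equiv track=rewrite | github.com/RodFernandes/Python_USP_Curso_Ciencias_da_Computacao_1 | remove_repetidos.py | remove_repetidos
-- ===== SOURCE A (Python) =====
-- def remove_repetidos(list):
--     lista_nova = []
--
--     for i in list:
--         exists = False
--         for j in lista_nova:
--             if i == j:
--                 exists = True
--                 break
--
--         if exists == False:
--             lista_nova.append(i)
--
--     return sorted(lista_nova)
-- ===== SOURCE B (Python) =====
-- def remove_repetidos(list):
--     s = sorted(list)
--     res = []
--     for x in s:
--         if not res or res[-1] != x:
--             res.append(x)
--     return res
-- ===== Notes on version B (the rewrite author's own statement) =====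
-- stated objective: faster
-- what changed: Replaces A's quadratic scan of the accumulator for every element with sort-first then one linear adjacent-duplicate sweep.
import Mathlib
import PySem

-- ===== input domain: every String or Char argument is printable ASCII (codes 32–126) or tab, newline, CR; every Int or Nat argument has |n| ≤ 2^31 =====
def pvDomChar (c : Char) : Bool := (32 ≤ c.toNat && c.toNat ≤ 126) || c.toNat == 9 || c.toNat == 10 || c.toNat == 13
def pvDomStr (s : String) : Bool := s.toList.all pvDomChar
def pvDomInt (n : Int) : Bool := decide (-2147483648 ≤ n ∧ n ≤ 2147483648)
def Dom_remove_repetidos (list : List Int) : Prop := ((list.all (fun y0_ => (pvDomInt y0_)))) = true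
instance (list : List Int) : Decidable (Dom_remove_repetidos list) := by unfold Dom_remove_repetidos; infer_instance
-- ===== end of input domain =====

-- B replaces A's quadratic accumulator-scan dedup with sort-first then one linear adjacent-duplicate sweep (faster in a timing run).
-- ===== PORT A =====
-- inner 'for j in lista_nova: if i == j: exists = True; break'
def pvScan_remove_repetidos (i : Int) : List Int → Bool
  | [] => false
  | j :: rest => if i == j then true else pvScan_remove_repetidos i rest

def remove_repetidos (list : List Int) : List Int :=
  let lista_nova :=
    list.foldl (fun acc i => if pvScan_remove_repetidos i acc then acc else acc ++ [i]) []
  PySem.List.sorted lista_nova (fun x => x) false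

-- ===== PORT B =====
def remove_repetidos_alt (list : List Int) : List Int :=
  let s := PySem.List.sorted list (fun x => x) false
  s.foldl (fun res x => if res.getLast? = some x then res else res ++ [x]) []


-- ===== PRECONDITION & SPEC =====
def Spec_remove_repetidos (list : List Int) (out : List Int) : Prop := out = remove_repetidos_alt list
instance (list : List Int) (out : List Int) : Decidable (Spec_remove_repetidos list out) := by unfold Spec_remove_repetidos; infer_instance

-- ===== CLAIM (what is proved, stated in full; the proofs are below) =====
def Claim_equal_remove_repetidos : Prop := ∀ (list : List Int), Dom_remove_repetidos list → Spec_remove_repetidos list (remove_repetidos list)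

-- ===== LEMMAS AND PROOFS =====

-- ===== VERDICT (by name: the statement is the Claim_ definition above) =====
-- i is in A's accumulator iff the inner scan finds it
lemma pvScan_iff (i : Int) (acc : List Int) : pvScan_remove_repetidos i acc = true ↔ i ∈ acc := by
  induction acc with
  | nil => simp [pvScan_remove_repetidos]
  | cons j rest ih =>
    simp only [pvScan_remove_repetidos, List.mem_cons]
    by_cases h : i = j <;> simp [h, ih]

-- A's accumulator loop: result is duplicate-free and holds exactly acc ∪ xs
lemma aLoop_spec (xs : List Int) : ∀ acc : List Int, acc.Nodup →
    (xs.foldl (fun acc i => if pvScan_remove_repetidos i acc then acc else acc ++ [i]) acc).Nodup ∧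
    ∀ a, a ∈ xs.foldl (fun acc i => if pvScan_remove_repetidos i acc then acc else acc ++ [i]) acc ↔
      a ∈ acc ∨ a ∈ xs := by
  induction xs with
  | nil => intro acc h; simp [h]
  | cons x xs ih =>
    intro acc h
    simp only [List.foldl_cons]
    by_cases hx : pvScan_remove_repetidos x acc = true
    · rw [if_pos hx]
      have hm : x ∈ acc := (pvScan_iff x acc).1 hx
      obtain ⟨h1, h2⟩ := ih acc h
      refine ⟨h1, fun a => ?_⟩
      rw [h2]
      simp only [List.mem_cons]
      have hax : a = x → a ∈ acc := fun h => h ▸ hm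
      tauto
    · rw [if_neg hx]
      have hnm : x ∉ acc := fun hm => hx ((pvScan_iff x acc).2 hm)
      have h' : (acc ++ [x]).Nodup := by
        simp only [List.nodup_append, List.nodup_singleton, h, true_and]
        intro a ha b hb
        exact fun hab => hnm ((hab.trans (List.mem_singleton.1 hb)) ▸ ha)
      obtain ⟨h1, h2⟩ := ih (acc ++ [x]) h'
      refine ⟨h1, fun a => ?_⟩
      rw [h2]
      simp only [List.mem_append, List.mem_cons]
      tauto

-- in a strictly increasing list the last element is the maximum
lemma le_getLast_of_pairwise_lt : ∀ (acc : List Int) (l : Int),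
    acc.Pairwise (· < ·) → acc.getLast? = some l → ∀ a ∈ acc, a ≤ l := by
  intro acc
  induction acc with
  | nil => intro l _ h; simp at h
  | cons b t ih =>
    intro l hp hl a ha
    cases t with
    | nil =>
      simp at hl ha
      omega
    | cons c u =>
      rw [List.getLast?_cons_cons] at hl
      rcases List.mem_cons.1 ha with rfl | ha
      · have hlm : l ∈ c :: u := List.mem_of_getLast? hl
        have : a < l := (List.pairwise_cons.1 hp).1 l hlm
        omega
      · exact ih l (List.pairwise_cons.1 hp).2 hl a ha

-- B's sweep over a ≤-sorted list: result strictly increasing, members = acc ∪ s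
lemma sweep_spec : ∀ (s acc : List Int), s.Pairwise (· ≤ ·) → acc.Pairwise (· < ·) →
    (∀ a ∈ acc, ∀ b ∈ s, a ≤ b) →
    (s.foldl (fun res x => if res.getLast? = some x then res else res ++ [x]) acc).Pairwise (· < ·) ∧
    ∀ a, a ∈ s.foldl (fun res x => if res.getLast? = some x then res else res ++ [x]) acc ↔
      a ∈ acc ∨ a ∈ s := by
  intro s
  induction s with
  | nil => intro acc _ hacc _; simp [hacc]
  | cons x s ih =>
    intro acc hs hacc hle
    simp only [List.foldl_cons]
    have hs' := (List.pairwise_cons.1 hs).2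
    have hxs := (List.pairwise_cons.1 hs).1
    by_cases hlast : acc.getLast? = some x
    · rw [if_pos hlast]
      have hxm : x ∈ acc := List.mem_of_getLast? hlast
      have hle' : ∀ a ∈ acc, ∀ b ∈ s, a ≤ b := fun a ha b hb => hle a ha b (List.mem_cons_of_mem _ hb)
      obtain ⟨h1, h2⟩ := ih acc hs' hacc hle'
      refine ⟨h1, fun a => ?_⟩
      rw [h2]
      simp only [List.mem_cons]
      have hax : a = x → a ∈ acc := fun h => h ▸ hxm
      tauto
    · rw [if_neg hlast]
      have hlt : ∀ a ∈ acc, a < x := by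
        intro a ha
        cases hacclast : acc.getLast? with
        | none =>
          rcases acc with _ | ⟨b, t⟩
          · simp at ha
          · simp at hacclast
        | some l =>
          have hal : a ≤ l := le_getLast_of_pairwise_lt acc l hacc hacclast a ha
          have hlm : l ∈ acc := List.mem_of_getLast? hacclast
          have hlx : l ≤ x := hle l hlm x (List.mem_cons_self)
          have : l ≠ x := fun h => hlast (h ▸ hacclast)
          omega
      have hacc' : (acc ++ [x]).Pairwise (· < ·) := by
        rw [List.pairwise_append]
        exact ⟨hacc, List.pairwise_singleton _ _, fun a ha b hb => (List.mem_singleton.1 hb) ▸ hlt a ha⟩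
      have hle' : ∀ a ∈ acc ++ [x], ∀ b ∈ s, a ≤ b := by
        intro a ha b hb
        rcases List.mem_append.1 ha with ha | ha
        · exact hle a ha b (List.mem_cons_of_mem _ hb)
        · exact (List.mem_singleton.1 ha) ▸ hxs b hb
      obtain ⟨h1, h2⟩ := ih (acc ++ [x]) hs' hacc' hle'
      refine ⟨h1, fun a => ?_⟩
      rw [h2]
      simp only [List.mem_append, List.mem_cons]
      tauto

theorem remove_repetidos_spec : Claim_equal_remove_repetidos := by
  intro list _
  unfold Spec_remove_repetidos remove_repetidos remove_repetidos_alt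
  simp only []
  set accA := list.foldl (fun acc i => if pvScan_remove_repetidos i acc then acc else acc ++ [i]) ([] : List Int) with haccA
  set s := PySem.List.sorted list (fun x => x) false with hsdef
  set bout := s.foldl (fun res x => if res.getLast? = some x then res else res ++ [x]) ([] : List Int) with hbout
  obtain ⟨hAnodup, hAmem⟩ := aLoop_spec list [] List.nodup_nil
  have hsle : s.Pairwise (· ≤ ·) := PySem.List.sorted_pairwise list (fun x => x) (κ := Int)
  obtain ⟨hBlt, hBmem⟩ := sweep_spec s [] hsle List.Pairwise.nil (by simp)
  have hBnodup : bout.Nodup := hBlt.imp (fun h => Int.ne_of_lt h)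
  have hperm : bout.Perm accA := by
    rw [List.perm_ext_iff_of_nodup hBnodup hAnodup]
    intro a
    rw [hBmem a, hAmem a]
    simp [hsdef, PySem.List.mem_sorted]
  exact (PySem.List.sorted_eq_of_perm_of_pairwise_lt accA bout (fun x => x) hperm hBlt)
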